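-- pv_equiv track=rewrite | github.com/saenyakorn/2110101-COMP-PROG | 09/09_MoreDC_34.py | pattern6
-- ===== SOURCE A (Python) =====
-- def pattern6(N):
--     o,r = [],1
--     for i in range(N):
--         o.append([])
--         for j in range(N):
--             o[i].append(0)
--     for j in range(N):
--         if j%2==0:
--             for i in range(N-j):
--                 o[i][i+j] = r
--                 r += 1
--         else:
--             for i in range(N-j):
--                 o[N-j-i-1][N-i-1] = r
--                 r += 1
--     return o
-- ===== SOURCE B (Python) =====
-- def pattern6(N):
--     def val(i, j):
--         d = j - i
--         base = d * N - d * (d - 1) // 2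
--         return base + i + 1 if d % 2 == 0 else base + N - d - i
--     return [[val(i, j) if j >= i else 0 for j in range(N)] for i in range(N)]
-- ===== Notes on version B (the rewrite author's own statement) =====
-- stated objective: alternative
-- what changed: B computes each cell's number directly from a closed-form arithmetic formula of its diagonal offset and row (a triangular-number base plus a parity-dependent row offset), instead of A's stateful traversal of the diagonals with a running counter and in-place assignment.
import Mathlib
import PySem

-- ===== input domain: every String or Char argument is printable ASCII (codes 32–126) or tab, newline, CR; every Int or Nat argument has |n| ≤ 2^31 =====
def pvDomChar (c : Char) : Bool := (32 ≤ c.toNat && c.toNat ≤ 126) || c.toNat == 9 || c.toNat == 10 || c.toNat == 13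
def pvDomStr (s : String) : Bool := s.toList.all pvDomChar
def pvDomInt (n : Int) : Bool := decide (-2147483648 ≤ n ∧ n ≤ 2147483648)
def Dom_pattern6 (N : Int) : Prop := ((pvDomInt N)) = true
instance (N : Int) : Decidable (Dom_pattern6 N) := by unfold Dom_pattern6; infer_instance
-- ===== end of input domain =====

-- B replaces A's stateful zigzag traversal by a closed-form per-cell formula (no counter, no mutation); same O(N^2) total cost, simpler.


-- ===== PORT A =====
-- 'o[i][j] = v': exact here because both programs only use nonnegative in-range indices
def pvSet2 (o : List (List Int)) (i j v : Int) : List (List Int) :=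
  o.set i.toNat ((o.getD i.toNat []).set j.toNat v)

def pattern6 (N : Int) : List (List Int) :=
  let o := (PySem.List.pyRange 0 N 1).foldl
    (fun o _i => o ++ [(PySem.List.pyRange 0 N 1).foldl (fun row _j => row ++ [(0:Int)]) []]) []
  let st := (PySem.List.pyRange 0 N 1).foldl
    (fun (st : List (List Int) × Int) j =>
      if PySem.Int.mod j 2 == 0 then
        (PySem.List.pyRange 0 (N - j) 1).foldl
          (fun st i => (pvSet2 st.1 i (i + j) st.2, st.2 + 1)) st
      else
        (PySem.List.pyRange 0 (N - j) 1).foldl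
          (fun st i => (pvSet2 st.1 (N - j - i - 1) (N - i - 1) st.2, st.2 + 1)) st)
    (o, 1)
  st.1

-- ===== PORT B =====
-- Source B's helper 'val(i, j)'
def pvVal (N i j : Int) : Int :=
  let d := j - i
  let base := d * N - PySem.Int.floordiv (d * (d - 1)) 2
  if PySem.Int.mod d 2 == 0 then base + i + 1 else base + N - d - i

def pattern6_alt (N : Int) : List (List Int) :=
  (PySem.List.pyRange 0 N 1).map (fun i =>
    (PySem.List.pyRange 0 N 1).map (fun j =>
      if j ≥ i then pvVal N i j else 0))

-- ===== PRECONDITION & SPEC =====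
def Spec_pattern6 (N : Int) (out : List (List Int)) : Prop := out = pattern6_alt N
instance (N : Int) (out : List (List Int)) : Decidable (Spec_pattern6 N out) := by unfold Spec_pattern6; infer_instance

-- ===== CLAIM (what is proved, stated in full; the proofs are below) =====
def Claim_equal_pattern6 : Prop := ∀ (N : Int), Dom_pattern6 N → Spec_pattern6 N (pattern6 N)

-- ===== LEMMAS AND PROOFS =====

-- matrix given by a function on indices
def pvOf (n : Nat) (g : Nat → Nat → Int) : List (List Int) :=
  (List.range n).map (fun i => (List.range n).map (fun j => g i j))

-- number of cells on diagonals strictly before d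
def pvBase (N d : Int) : Int := d * N - PySem.Int.floordiv (d * (d - 1)) 2

-- matrix after all diagonals < m are numbered
def gD (N m : Int) (i j : Nat) : Int :=
  if (i:Int) ≤ j ∧ (j:Int) - i < m then pvVal N i j else 0
-- even diagonal d partially numbered: rows < t done
def gE (N d : Int) (t : Nat) (i j : Nat) : Int :=
  if (i:Int) ≤ j ∧ ((j:Int) - i < d ∨ ((j:Int) - i = d ∧ i < t)) then pvVal N i j else 0
-- odd diagonal d partially numbered: bottom t rows done
def gO (N d : Int) (t : Nat) (i j : Nat) : Int :=
  if (i:Int) ≤ j ∧ ((j:Int) - i < d ∨ ((j:Int) - i = d ∧ N - d - t ≤ (i:Int))) then pvVal N i j else 0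

theorem pvOf_congr (n : Nat) (g g' : Nat → Nat → Int)
    (h : ∀ i < n, ∀ j < n, g i j = g' i j) : pvOf n g = pvOf n g' := by
  unfold pvOf
  apply List.map_congr_left
  intro i hi
  apply List.map_congr_left
  intro j hj
  exact h i (List.mem_range.1 hi) j (List.mem_range.1 hj)

theorem pvSet2_of (n : Nat) (g : Nat → Nat → Int) (a b : Nat) (v : Int)
    (ha : a < n) (hb : b < n) :
    pvSet2 (pvOf n g) (a:Int) (b:Int) v
      = pvOf n (fun i j => if i = a ∧ j = b then v else g i j) := by
  unfold pvSet2 pvOf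
  simp only [Int.toNat_natCast]
  have hget : ((List.range n).map (fun i => (List.range n).map (fun j => g i j))).getD a []
      = (List.range n).map (fun j => g a j) := by
    rw [List.getD_eq_getElem?_getD]
    simp [ha]
  rw [hget]
  apply List.ext_getElem
  · simp
  · intro i h1 h2
    simp only [List.getElem_set, List.getElem_map, List.getElem_range] at *
    by_cases hia : a = i
    · subst hia
      rw [if_pos rfl]
      apply List.ext_getElem
      · simp
      · intro j h3 h4
        simp only [List.getElem_set, List.getElem_map, List.getElem_range] at *
        by_cases hjb : b = j
        · subst hjb; simp
        · rw [if_neg hjb, if_neg (by simp_all [eq_comm])]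
    · rw [if_neg hia]
      apply List.map_congr_left
      intro j _
      rw [if_neg (by intro h; exact hia h.1.symm)]

theorem pvBase_succ (N d : Int) : pvBase N (d + 1) = pvBase N d + (N - d) := by
  unfold pvBase
  rw [PySem.Int.floordiv_eq_ediv_of_pos (by norm_num),
      PySem.Int.floordiv_eq_ediv_of_pos (by norm_num)]
  have h : (d + 1) * (d + 1 - 1) = d * (d - 1) + d * 2 := by ring
  rw [h, Int.add_mul_ediv_right _ _ (by norm_num : (2:Int) ≠ 0)]
  ring

theorem pvVal_diag (N d i : Int) :
    pvVal N i (i + d)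
      = if PySem.Int.mod d 2 == 0 then pvBase N d + i + 1 else pvBase N d + N - d - i := by
  unfold pvVal pvBase
  simp only [add_sub_cancel_left]

-- even diagonal: A's inner fold fills rows 0..t-1 of diagonal d
theorem pvEvenFold (N d : Int) (hd0 : 0 ≤ d) (hpar : PySem.Int.mod d 2 = 0)
    (n : Nat) (hn : (n:Int) = N) :
    ∀ t : Nat, (t:Int) ≤ N - d →
    (List.range t).foldl
        (fun (st : List (List Int) × Int) (k : Nat) =>
          (pvSet2 st.1 (k:Int) ((k:Int) + d) st.2, st.2 + 1))
        (pvOf n (gE N d 0), pvBase N d + 1)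
      = (pvOf n (gE N d t), pvBase N d + 1 + t) := by
  intro t ht
  induction t with
  | zero => simp
  | succ t ih =>
    have ht' : (t:Int) ≤ N - d := by push_cast at ht ⊢; omega
    rw [List.range_succ, List.foldl_append, ih ht', List.foldl_cons, List.foldl_nil]
    simp only [Prod.mk.injEq]
    refine ⟨?_, ?_⟩
    · -- matrix part
      have hb : t + d.toNat < n := by omega
      have hcast : ((t + d.toNat : Nat) : Int) = (t:Int) + d := by push_cast; omega
      have : ((t:Int) + d) = ((t + d.toNat : Nat) : Int) := hcast.symm
      rw [this, pvSet2_of n _ t (t + d.toNat) _ (by omega) hb]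
      apply pvOf_congr
      intro i hi j hj
      by_cases hij : i = t ∧ j = t + d.toNat
      · rw [if_pos hij]
        obtain ⟨h1, h2⟩ := hij
        unfold gE
        rw [h1, h2]
        rw [if_pos (by push_cast; omega)]
        have hc : ((t + d.toNat : Nat) : Int) = (t:Int) + d := by push_cast; omega
        rw [hc, pvVal_diag, hpar]
        simp only [show ((0:Int) == 0) = true by rfl, if_true]
        ring
      · rw [if_neg hij]
        unfold gE
        have : ((i:Int) ≤ j ∧ ((j:Int) - i < d ∨ ((j:Int) - i = d ∧ i < t)))
            ↔ ((i:Int) ≤ j ∧ ((j:Int) - i < d ∨ ((j:Int) - i = d ∧ i < t + 1))) := by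
          constructor
          · rintro ⟨h1, h2⟩
            exact ⟨h1, h2.imp id (fun ⟨ha, hb'⟩ => ⟨ha, by omega⟩)⟩
          · rintro ⟨h1, h2⟩
            refine ⟨h1, h2.imp id (fun ⟨ha, hb'⟩ => ⟨ha, ?_⟩)⟩
            rcases Nat.lt_succ_iff_lt_or_eq.1 hb' with h | h
            · exact h
            · exfalso; exact hij ⟨h, by omega⟩
        split_ifs with hc1 hc2 hc2
        · rfl
        · exact absurd (this.1 hc1) hc2
        · exact absurd (this.2 hc2) hc1
        · rfl
    · -- counter part
      push_cast; ring

-- odd diagonal: A's inner fold fills the bottom t rows of diagonal d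
theorem pvOddFold (N d : Int) (hd0 : 0 ≤ d) (hdN : d < N) (hpar : PySem.Int.mod d 2 = 1)
    (n : Nat) (hn : (n:Int) = N) :
    ∀ t : Nat, (t:Int) ≤ N - d →
    (List.range t).foldl
        (fun (st : List (List Int) × Int) (k : Nat) =>
          (pvSet2 st.1 (N - d - (k:Int) - 1) (N - (k:Int) - 1) st.2, st.2 + 1))
        (pvOf n (gO N d 0), pvBase N d + 1)
      = (pvOf n (gO N d t), pvBase N d + 1 + t) := by
  intro t ht
  induction t with
  | zero => simp
  | succ t ih =>
    have ht' : (t:Int) ≤ N - d := by push_cast at ht ⊢; omega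
    rw [List.range_succ, List.foldl_append, ih ht', List.foldl_cons, List.foldl_nil]
    have hcastN : (n:Int) = N := hn
    set a : Nat := n - d.toNat - t - 1 with hadef
    set b : Nat := n - t - 1 with hbdef
    have hta : (t:Int) < N - d := by push_cast at ht; omega
    have haeq : ((a:Int)) = N - d - t - 1 := by
      have : d.toNat + t + 1 ≤ n := by omega
      push_cast [hadef]; omega
    have hbeq : ((b:Int)) = N - t - 1 := by
      have : t + 1 ≤ n := by omega
      push_cast [hbdef]; omega
    simp only [Prod.mk.injEq]
    refine ⟨?_, ?_⟩
    · rw [show (N - d - (t:Int) - 1) = ((a:Int)) from haeq.symm,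
          show (N - (t:Int) - 1) = ((b:Int)) from hbeq.symm,
          pvSet2_of n _ a b _ (by omega) (by omega)]
      apply pvOf_congr
      intro i hi j hj
      by_cases hij : i = a ∧ j = b
      · rw [if_pos hij]
        obtain ⟨h1, h2⟩ := hij
        unfold gO
        rw [h1, h2]
        rw [if_pos ⟨by omega, Or.inr ⟨by omega, by omega⟩⟩]
        have hba : ((b:Int)) = (a:Int) + d := by omega
        rw [hba, pvVal_diag, hpar]
        simp only [show ((1:Int) == 0) = false by rfl, Bool.false_eq_true, if_false]
        omega
      · rw [if_neg hij]
        unfold gO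
        have key : ((i:Int) ≤ j ∧ ((j:Int) - i < d ∨ ((j:Int) - i = d ∧ N - d - t ≤ (i:Int))))
            ↔ ((i:Int) ≤ j ∧ ((j:Int) - i < d ∨ ((j:Int) - i = d ∧ N - d - (t+1) ≤ (i:Int)))) := by
          constructor
          · rintro ⟨h1, h2⟩
            exact ⟨h1, h2.imp id (fun ⟨hx, hy⟩ => ⟨hx, by omega⟩)⟩
          · rintro ⟨h1, h2⟩
            refine ⟨h1, h2.imp id (fun ⟨hx, hy⟩ => ⟨hx, ?_⟩)⟩
            by_contra hlt
            have hia : (i:Int) = N - d - t - 1 := by omega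
            have hja : (j:Int) = N - t - 1 := by omega
            exact hij ⟨by omega, by omega⟩
        split_ifs with hc1 hc2 hc2
        · rfl
        · exact absurd (key.1 hc1) hc2
        · exact absurd (key.2 hc2) hc1
        · rfl
    · push_cast; ring

-- the outer fold over diagonals
theorem pvOuterFold (N : Int) (n : Nat) (hn : (n:Int) = N) :
    ∀ m : Nat, (m:Int) ≤ N →
    (List.range m).foldl
        (fun (st : List (List Int) × Int) (k : Nat) =>
          if PySem.Int.mod (k:Int) 2 == 0 then
            (PySem.List.pyRange 0 (N - k) 1).foldl
              (fun st i => (pvSet2 st.1 i (i + k) st.2, st.2 + 1)) st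
          else
            (PySem.List.pyRange 0 (N - k) 1).foldl
              (fun st i => (pvSet2 st.1 (N - k - i - 1) (N - i - 1) st.2, st.2 + 1)) st)
        (pvOf n (gD N 0), 1)
      = (pvOf n (gD N m), pvBase N m + 1) := by
  intro m hm
  induction m with
  | zero =>
    simp only [List.range_zero, List.foldl_nil]
    congr 1
    unfold pvBase
    norm_num [PySem.Int.floordiv]
  | succ m ih =>
    have hm' : (m:Int) ≤ N := by push_cast at hm ⊢; omega
    have hmN : (m:Int) < N := by push_cast at hm; omega
    rw [List.range_succ, List.foldl_append, ih hm', List.foldl_cons, List.foldl_nil]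
    have hrange : PySem.List.pyRange 0 (N - m) 1
        = (List.range (N - (m:Int)).toNat).map (fun k : Nat => (0:Int) + k) := by
      rw [PySem.List.pyRange_one]; simp
    have hlen : (((N - (m:Int)).toNat : Nat) : Int) = N - m := by omega
    have hgd0 : gD N m = gE N m 0 := by
      funext i j
      unfold gD gE
      congr 1
      simp only [eq_iff_iff]
      constructor
      · rintro ⟨h1, h2⟩; exact ⟨h1, Or.inl h2⟩
      · rintro ⟨h1, h2⟩
        refine ⟨h1, ?_⟩
        rcases h2 with h | ⟨_, h⟩
        · exact h
        · omega
    rcases PySem.Int.mod_two_eq (m:Int) with hpar | hpar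
    · rw [hpar]
      simp only [show ((0:Int) == 0) = true by rfl, if_true]
      rw [hrange, List.foldl_map]
      simp only [zero_add]
      rw [hgd0, pvEvenFold N m (by positivity) hpar n hn _ (by omega)]
      simp only [Prod.mk.injEq]
      refine ⟨?_, ?_⟩
      · apply pvOf_congr
        intro i hi j hj
        unfold gE gD
        congr 1
        simp only [eq_iff_iff]
        constructor
        · rintro ⟨h1, h2⟩
          refine ⟨h1, ?_⟩
          rcases h2 with h | ⟨h, _⟩ <;> omega
        · rintro ⟨h1, h2⟩
          refine ⟨h1, ?_⟩
          by_cases h : (j:Int) - i < m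
          · exact Or.inl h
          · refine Or.inr ⟨by omega, by omega⟩
      · push_cast [pvBase_succ]; omega
    · rw [hpar]
      simp only [show ((1:Int) == 0) = false by rfl, Bool.false_eq_true, if_false]
      rw [hrange, List.foldl_map]
      simp only [zero_add]
      have hstart : pvOf n (gE N m 0) = pvOf n (gO N m 0) := by
        apply pvOf_congr
        intro i hi j hj
        unfold gE gO
        congr 1
        simp only [eq_iff_iff, Nat.not_lt_zero]
        constructor
        · rintro ⟨h1, h2⟩
          refine ⟨h1, ?_⟩
          rcases h2 with h | ⟨_, h⟩
          · exact Or.inl h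
          · exact h.elim
        · rintro ⟨h1, h2⟩
          refine ⟨h1, ?_⟩
          rcases h2 with h | ⟨hd, h⟩
          · exact Or.inl h
          · exfalso; omega
      rw [hgd0, hstart, pvOddFold N m (by positivity) hmN hpar n hn _ (by omega)]
      simp only [Prod.mk.injEq]
      refine ⟨?_, ?_⟩
      · apply pvOf_congr
        intro i hi j hj
        unfold gO gD
        congr 1
        simp only [eq_iff_iff]
        constructor
        · rintro ⟨h1, h2⟩
          refine ⟨h1, ?_⟩
          rcases h2 with h | ⟨h, _⟩ <;> omega
        · rintro ⟨h1, h2⟩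
          refine ⟨h1, ?_⟩
          by_cases h : (j:Int) - i < m
          · exact Or.inl h
          · exact Or.inr ⟨by omega, by omega⟩
      · push_cast [pvBase_succ]; omega

-- final assembly
theorem pattern6_eq (N : Int) : pattern6 N = pattern6_alt N := by
  unfold pattern6 pattern6_alt
  by_cases hN : N ≤ 0
  · rw [PySem.List.pyRange_one_eq_nil hN]
    rfl
  · replace hN : 0 < N := by omega
    rw [PySem.List.foldl_append_singleton_eq_map, PySem.List.foldl_append_singleton_eq_map]
    simp only [List.nil_append]
    have hn : ((N.toNat : Nat) : Int) = N := Int.toNat_of_nonneg (le_of_lt hN)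
    set n : Nat := N.toNat with hndef
    have hrange : PySem.List.pyRange 0 N 1 = (List.range n).map (fun k : Nat => ((k:Int))) := by
      rw [PySem.List.pyRange_one]; simp [hndef]
    rw [hrange, List.foldl_map]
    have hz : ((List.range n).map (fun k : Nat => ((k:Int)))).map
        (fun _i => ((List.range n).map (fun k : Nat => ((k:Int)))).map (fun _j => (0:Int)))
        = pvOf n (gD N 0) := by
      unfold pvOf gD
      simp only [List.map_map, Function.comp_def]
      apply List.map_congr_left; intro i _
      apply List.map_congr_left; intro j _
      rw [if_neg (by omega)]
    rw [hz, pvOuterFold N n hn n (by omega)]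
    unfold pvOf gD
    simp only [List.map_map, Function.comp_def]
    apply List.map_congr_left; intro i hi
    apply List.map_congr_left; intro j hj
    have hi' := List.mem_range.1 hi
    have hj' := List.mem_range.1 hj
    simp only [ge_iff_le]
    by_cases h : (i:Int) ≤ (j:Int)
    · rw [if_pos ⟨h, by omega⟩, if_pos h]
    · rw [if_neg (by tauto), if_neg h]

-- ===== VERDICT (by name: the statement is the Claim_ definition above) =====
theorem pattern6_spec : Claim_equal_pattern6 := by
  intro N _
  unfold Spec_pattern6
  exact pattern6_eq N
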